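-- pv_equiv track=rewrite | github.com/MiladShahidi/AX3-Sleep-Wake | sleep_wake_filters.py | filter_square_wave
-- ===== SOURCE A (Python) =====
-- def filter_square_wave(square_wave):
--     filtered_wave = square_wave.copy()
--     consecutive_zeros = 0
--     first_one_found = False
--     for i, val in enumerate(square_wave):
--         if val == 1:
--             if not first_one_found:
--                 first_one_found = True
--                 consecutive_zeros = 0
--                 continue
--             if consecutive_zeros > 0 and consecutive_zeros < 20:
--                 for j in range(i - consecutive_zeros, i):
--                     filtered_wave[j] = 1
--             consecutive_zeros = 0
--         else:
--             consecutive_zeros += 1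
--     if consecutive_zeros > 0 and consecutive_zeros < 20 and first_one_found:
--         for j in range(len(square_wave) - consecutive_zeros, len(square_wave)):
--             filtered_wave[j] = 1
--     return filtered_wave
-- ===== SOURCE B (Python) =====
-- def filter_square_wave(square_wave):
--     filtered = list(square_wave)
--     ones = [i for i, v in enumerate(square_wave) if v == 1]
--     if not ones:
--         return filtered
--     for p, q in zip(ones, ones[1:]):
--         if 0 < q - p - 1 < 20:
--             for j in range(p + 1, q):
--                 filtered[j] = 1
--     tail = len(square_wave) - 1 - ones[-1]
--     if 0 < tail < 20:
--         for j in range(ones[-1] + 1, len(square_wave)):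
--             filtered[j] = 1
--     return filtered
-- ===== Notes on version B (the rewrite author's own statement) =====
-- stated objective: alternative
-- what changed: B first collects the indices of the ones, then fills each short gap between consecutive one-indices (and the short trailing gap) directly, instead of A's single stateful scan with a consecutive-zeros counter and first-one flag.
import Mathlib
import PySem

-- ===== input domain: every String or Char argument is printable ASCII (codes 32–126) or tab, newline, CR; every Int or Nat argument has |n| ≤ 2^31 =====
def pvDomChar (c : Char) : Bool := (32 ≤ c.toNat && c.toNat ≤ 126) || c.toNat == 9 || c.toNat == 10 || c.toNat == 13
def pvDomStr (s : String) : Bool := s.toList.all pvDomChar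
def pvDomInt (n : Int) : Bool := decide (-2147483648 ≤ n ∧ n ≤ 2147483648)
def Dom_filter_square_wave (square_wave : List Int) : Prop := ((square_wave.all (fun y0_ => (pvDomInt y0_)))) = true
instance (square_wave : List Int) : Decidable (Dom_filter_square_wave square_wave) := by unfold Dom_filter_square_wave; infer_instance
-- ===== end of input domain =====

-- B replaces A's stateful zero-counting scan by collecting the one-indices and filling
-- the short gaps between consecutive ones directly (objective: alternative decomposition).

-- Both ports index with Nat (the indices here are always nonnegative enumerate positions);
-- the inner fill loop `for j in range(a, b): fw[j] = 1` of both Pythons is pvFill.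
def pvFill (l : List Int) (a b : Nat) : List Int :=
  (List.range' a (b - a)).foldl (fun acc j => acc.set j 1) l

-- ===== PORT A =====
-- one iteration of A's loop; state = (filtered_wave, consecutive_zeros, first_one_found)
def pvStepA (st : List Int × Nat × Bool) (iv : Nat × Int) : List Int × Nat × Bool :=
  match st, iv with
  | (fw, cz, fof), (i, v) =>
    if v = 1 then
      if fof = false then (fw, 0, true)
      else if 0 < cz ∧ cz < 20 then (pvFill fw (i - cz) i, 0, true)
      else (fw, 0, true)
    else (fw, cz + 1, fof)

def filter_square_wave (square_wave : List Int) : List Int :=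
  let r := ((List.range square_wave.length).zip square_wave).foldl pvStepA (square_wave, 0, false)
  if 0 < r.2.1 ∧ r.2.1 < 20 ∧ r.2.2 = true then
    pvFill r.1 (square_wave.length - r.2.1) square_wave.length
  else r.1

-- ===== PORT B =====
-- `ones = [i for i, v in enumerate(square_wave) if v == 1]`
def pvOnes (xs : List Int) : List Nat :=
  ((List.range xs.length).zip xs).filterMap (fun iv => if iv.2 = 1 then some iv.1 else none)

def filter_square_wave_alt (square_wave : List Int) : List Int :=
  match pvOnes square_wave with
  | [] => square_wave
  | o :: os =>
    let ones := o :: os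
    let filtered := (ones.zip ones.tail).foldl
      (fun acc pq =>
        if 0 < pq.2 - pq.1 - 1 ∧ pq.2 - pq.1 - 1 < 20 then pvFill acc (pq.1 + 1) pq.2 else acc)
      square_wave
    let last := ones.getLast!
    let tail := square_wave.length - 1 - last
    if 0 < tail ∧ tail < 20 then pvFill filtered (last + 1) square_wave.length else filtered

-- ===== PRECONDITION & SPEC =====
def Spec_filter_square_wave (square_wave : List Int) (out : List Int) : Prop := out = filter_square_wave_alt square_wave
instance (square_wave : List Int) (out : List Int) : Decidable (Spec_filter_square_wave square_wave out) := by unfold Spec_filter_square_wave; infer_instance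

-- ===== CLAIM (what is proved, stated in full; the proofs are below) =====
def Claim_equal_filter_square_wave : Prop := ∀ (square_wave : List Int), Dom_filter_square_wave square_wave → Spec_filter_square_wave square_wave (filter_square_wave square_wave)

-- ===== LEMMAS AND PROOFS =====

-- the middle part of B: filling the gaps between consecutive ones (no tail fill)
def pvPairsFill (xs : List Int) : List Int :=
  ((pvOnes xs).zip (pvOnes xs).tail).foldl
    (fun acc pq =>
      if 0 < pq.2 - pq.1 - 1 ∧ pq.2 - pq.1 - 1 < 20 then pvFill acc (pq.1 + 1) pq.2 else acc)
    xs

-- the value of A's consecutive_zeros counter at loop end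
def pvCz (xs : List Int) : Nat :=
  if pvOnes xs = [] then xs.length else xs.length - 1 - (pvOnes xs).getLast!

theorem pvFill_length (js : List Nat) (l : List Int) :
    (js.foldl (fun acc j => acc.set j 1) l).length = l.length := by
  induction js generalizing l with
  | nil => rfl
  | cons j js ih => simp [List.foldl, ih]

theorem foldl_set_append (js : List Nat) (l t : List Int) (h : ∀ j ∈ js, j < l.length) :
    js.foldl (fun acc j => acc.set j 1) (l ++ t)
      = js.foldl (fun acc j => acc.set j 1) l ++ t := by
  induction js generalizing l with
  | nil => rfl
  | cons j js ih =>
      simp only [List.foldl]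
      rw [List.set_append_left _ _ (h j (by simp))]
      exact ih (l.set j 1) (by intro x hx; simpa using h x (by simp [hx]))

theorem pvFill_append (l t : List Int) (a b : Nat) (hb : b ≤ l.length) :
    pvFill (l ++ t) a b = pvFill l a b ++ t := by
  unfold pvFill
  apply foldl_set_append
  intro j hj
  have := List.mem_range'.1 hj
  omega

theorem pvFill_len (l : List Int) (a b : Nat) : (pvFill l a b).length = l.length :=
  pvFill_length _ _

theorem enum_append (xs : List Int) (x : Int) :
    (List.range (xs ++ [x]).length).zip (xs ++ [x])
      = (List.range xs.length).zip xs ++ [(xs.length, x)] := by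
  simp only [List.length_append, List.length_singleton, List.range_succ]
  rw [List.zip_append (by simp)]
  rfl

theorem ones_lt (xs : List Int) : ∀ o ∈ pvOnes xs, o < xs.length := by
  intro o ho
  unfold pvOnes at ho
  simp only [List.mem_filterMap] at ho
  obtain ⟨iv, hmem, hsome⟩ := ho
  have h1 := List.of_mem_zip hmem
  have := List.mem_range.1 h1.1
  split at hsome
  · cases hsome; exact this
  · cases hsome

theorem ones_append (xs : List Int) (x : Int) :
    pvOnes (xs ++ [x]) = pvOnes xs ++ (if x = 1 then [xs.length] else []) := by
  unfold pvOnes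
  rw [enum_append, List.filterMap_append]
  split_ifs with h <;> simp [h]

theorem getLast!_concat (l : List Nat) (a : Nat) : (l ++ [a]).getLast! = a :=
  List.getLast!_of_getLast? List.getLast?_concat

theorem getLast!_mem (l : List Nat) (h : l ≠ []) : l.getLast! ∈ l := by
  cases hl : l.getLast? with
  | none => exact absurd (List.getLast?_eq_none_iff.1 hl) h
  | some a => rw [List.getLast!_of_getLast? hl]; exact List.mem_of_getLast? hl

theorem zip_tail_concat (a : Nat) (l : List Nat) (n : Nat) :
    ((a :: l) ++ [n]).zip (((a :: l) ++ [n]).tail)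
      = (a :: l).zip l ++ [((a :: l).getLast!, n)] := by
  induction l generalizing a with
  | nil =>
      rw [show ([a] : List Nat).getLast! = a from getLast!_concat [] a]
      simp
  | cons b l ih =>
      have h2 : (a :: b :: l).getLast! = (b :: l).getLast! := by
        cases hl : (b :: l).getLast? with
        | none => simp at hl
        | some c =>
            rw [List.getLast!_of_getLast? hl,
              List.getLast!_of_getLast? (by rw [List.getLast?_cons_cons, hl])]
      simpa [h2] using ih b

-- fw++t commutes through B's pair fold when every right index is in range
theorem foldB_append (pairs : List (Nat × Nat)) (l t : List Int)
    (h : ∀ pq ∈ pairs, pq.2 ≤ l.length) :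
    pairs.foldl
      (fun acc pq =>
        if 0 < pq.2 - pq.1 - 1 ∧ pq.2 - pq.1 - 1 < 20 then pvFill acc (pq.1 + 1) pq.2 else acc)
      (l ++ t)
      = pairs.foldl
          (fun acc pq =>
            if 0 < pq.2 - pq.1 - 1 ∧ pq.2 - pq.1 - 1 < 20 then pvFill acc (pq.1 + 1) pq.2 else acc)
          l ++ t := by
  induction pairs generalizing l with
  | nil => rfl
  | cons pq pairs ih =>
      simp only [List.foldl]
      split_ifs with hc
      · rw [pvFill_append _ _ _ _ (h pq (by simp))]
        exact ih _ (by intro x hx; rw [pvFill_len]; exact h x (by simp [hx]))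
      · exact ih _ (by intro x hx; exact h x (by simp [hx]))

-- fw++t commutes through A's fold when every index is ≤ |l|
theorem foldA_append (ps : List (Nat × Int)) (l t : List Int) (cz : Nat) (fof : Bool)
    (h : ∀ p ∈ ps, p.1 ≤ l.length) :
    ps.foldl pvStepA (l ++ t, cz, fof)
      = ((ps.foldl pvStepA (l, cz, fof)).1 ++ t, (ps.foldl pvStepA (l, cz, fof)).2) := by
  induction ps generalizing l cz fof with
  | nil => rfl
  | cons p ps ih =>
      obtain ⟨i, v⟩ := p
      simp only [List.foldl]
      have hi : i ≤ l.length := h (i, v) (by simp)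
      have hrest : ∀ q ∈ ps, q.1 ≤ l.length := by intro q hq; exact h q (by simp [hq])
      by_cases hv : v = 1
      · by_cases hf : fof = false
        · simp only [pvStepA, hv, hf, if_pos trivial]
          exact ih l 0 true hrest
        · by_cases hc : 0 < cz ∧ cz < 20
          · simp only [pvStepA, hv, reduceIte, if_neg hf, if_pos hc]
            rw [pvFill_append _ _ _ _ hi]
            have := ih (pvFill l (i - cz) i) 0 true (by rw [pvFill_len]; exact hrest)
            simpa using this
          · simp only [pvStepA, hv, reduceIte, if_neg hf, if_neg hc]
            exact ih l 0 true hrest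
      · simp only [pvStepA, if_neg hv]
        exact ih l (cz + 1) fof hrest

theorem pvPairsFill_nil_ones (xs : List Int) (h : pvOnes xs = []) : pvPairsFill xs = xs := by
  unfold pvPairsFill; rw [h]; rfl

-- the loop invariant: after A's scan the state is B's pair-filled list, the trailing
-- gap length, and the "some one was seen" flag
theorem loopA_eq (xs : List Int) :
    ((List.range xs.length).zip xs).foldl pvStepA (xs, 0, false)
      = (pvPairsFill xs, pvCz xs, !(pvOnes xs).isEmpty) := by
  induction xs using List.reverseRecOn with
  | nil => simp [pvPairsFill, pvCz, pvOnes]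
  | append_singleton xs x ih =>
      rw [enum_append, List.foldl_append]
      have hbound : ∀ p ∈ (List.range xs.length).zip xs, p.1 ≤ xs.length := by
        intro p hp
        exact le_of_lt (List.mem_range.1 (List.of_mem_zip hp).1)
      rw [foldA_append _ _ _ _ _ hbound, ih]
      simp only [List.foldl]
      have hones := ones_append xs x
      by_cases hv : x = 1
      · subst hv
        by_cases hne : pvOnes xs = []
        · -- the first one of the wave
          have hpf : pvPairsFill xs = xs := pvPairsFill_nil_ones xs hne
          have hones' : pvOnes (xs ++ [1]) = [xs.length] := by rw [hones, hne]; simp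
          have h1 : pvPairsFill (xs ++ [1]) = xs ++ [1] := by
            unfold pvPairsFill; rw [hones']; rfl
          have h2 : pvCz (xs ++ [1]) = 0 := by
            simp only [pvCz, hones', if_neg (by simp : ¬([xs.length] = ([] : List Nat)))]
            rw [show ([xs.length] : List Nat).getLast! = xs.length from getLast!_concat [] _]
            simp
          have hfalse : (!(pvOnes xs).isEmpty) = false := by simp [hne]
          have hstep : ∀ (fw : List Int) (cz : Nat),
              pvStepA (fw, cz, false) (xs.length, (1 : Int)) = (fw, 0, true) := by
            intro fw cz; simp [pvStepA]
          rw [hfalse, hstep, hpf, h1, h2, hones']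
          rfl
        · -- a subsequent one: A fills the gap since the previous one, B fills the new pair
          have hlast := getLast!_mem (pvOnes xs) hne
          have hlt : (pvOnes xs).getLast! < xs.length := ones_lt xs _ hlast
          have hcz : pvCz xs = xs.length - 1 - (pvOnes xs).getLast! := by
            simp [pvCz, hne]
          have hones' : pvOnes (xs ++ [1]) = pvOnes xs ++ [xs.length] := by
            simp [hones]
          have hflag : (!(pvOnes xs).isEmpty) = true := by simp [hne]
          have hflag' : (!(pvOnes (xs ++ [1])).isEmpty) = true := by
            rw [hones']
            simp
          have hbound2 : ∀ pq ∈ (pvOnes xs).zip (pvOnes xs).tail, pq.2 ≤ xs.length := by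
            intro pq hpq
            have h2 := (List.of_mem_zip hpq).2
            exact le_of_lt (ones_lt xs _ (List.mem_of_mem_tail h2))
          have hzip : (pvOnes (xs ++ [1])).zip (pvOnes (xs ++ [1])).tail
              = (pvOnes xs).zip (pvOnes xs).tail ++ [((pvOnes xs).getLast!, xs.length)] := by
            obtain ⟨o, os, hE⟩ := List.exists_cons_of_ne_nil hne
            rw [hones', hE]
            simpa using zip_tail_concat o os xs.length
          have hPF : pvPairsFill (xs ++ [1])
              = (if 0 < xs.length - (pvOnes xs).getLast! - 1 ∧
                    xs.length - (pvOnes xs).getLast! - 1 < 20 then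
                   pvFill (pvPairsFill xs ++ [1]) ((pvOnes xs).getLast! + 1) xs.length
                 else pvPairsFill xs ++ [1]) := by
            unfold pvPairsFill
            rw [hzip, List.foldl_append, foldB_append _ _ _ hbound2]
            rfl
          have hczval : pvCz (xs ++ [1]) = 0 := by
            simp only [pvCz, hones']
            rw [if_neg (by simp), getLast!_concat]
            simp
          have harith1 : xs.length - pvCz xs = (pvOnes xs).getLast! + 1 := by
            rw [hcz]; omega
          have harith2 : (0 < pvCz xs ∧ pvCz xs < 20)
              ↔ (0 < xs.length - (pvOnes xs).getLast! - 1 ∧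
                  xs.length - (pvOnes xs).getLast! - 1 < 20) := by
            rw [hcz]; omega
          have hstep : ∀ (fw : List Int) (cz : Nat),
              pvStepA (fw, cz, true) (xs.length, (1 : Int))
                = (if 0 < cz ∧ cz < 20 then pvFill fw (xs.length - cz) xs.length else fw,
                   0, true) := by
            intro fw cz
            by_cases hc : 0 < cz ∧ cz < 20
            · simp [pvStepA, hc]
            · simp [pvStepA, hc]
          rw [hflag, hstep, hPF, hczval, hflag']
          split_ifs with h1 h2 h2
          · rw [harith1]
          · exact absurd (harith2.1 h1) h2
          · exact absurd (harith2.2 h2) h1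
          · rfl
      · -- x ≠ 1: the counter increments, the list part is unchanged
        have hones' : pvOnes (xs ++ [x]) = pvOnes xs := by simp [hones, hv]
        have hPF : pvPairsFill (xs ++ [x]) = pvPairsFill xs ++ [x] := by
          unfold pvPairsFill
          rw [hones']
          exact foldB_append _ _ _ (by
            intro pq hpq
            have h2 := (List.of_mem_zip hpq).2
            exact le_of_lt (ones_lt xs _ (List.mem_of_mem_tail h2)))
        have hcz' : pvCz (xs ++ [x]) = pvCz xs + 1 := by
          rcases hE : pvOnes xs with _ | ⟨o, os⟩
          · simp [pvCz, hones', hE]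
          · have hne : pvOnes xs ≠ [] := by rw [hE]; simp
            have hlt : (pvOnes xs).getLast! < xs.length :=
              ones_lt xs _ (getLast!_mem (pvOnes xs) hne)
            rw [← hE] at *
            simp only [pvCz, hones', if_neg hne, List.length_append,
              List.length_singleton]
            omega
        simp only [pvStepA, if_neg hv]
        rw [hPF, hcz', hones']

-- ===== VERDICT (by name: the statement is the Claim_ definition above) =====
theorem filter_square_wave_spec : Claim_equal_filter_square_wave := by
  intro xs _
  unfold Spec_filter_square_wave filter_square_wave filter_square_wave_alt
  rw [loopA_eq]
  rcases hE : pvOnes xs with _ | ⟨o, os⟩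
  · simp [pvPairsFill_nil_ones xs hE]
  · have hne : pvOnes xs ≠ [] := by rw [hE]; simp
    have hlt : (pvOnes xs).getLast! < xs.length :=
      ones_lt xs _ (getLast!_mem (pvOnes xs) hne)
    have hcz : pvCz xs = xs.length - 1 - (pvOnes xs).getLast! := by simp [pvCz, hne]
    have hPFeq : List.foldl
        (fun acc pq =>
          if 0 < pq.2 - pq.1 - 1 ∧ pq.2 - pq.1 - 1 < 20 then pvFill acc (pq.1 + 1) pq.2 else acc)
        xs ((o :: os).zip os) = pvPairsFill xs := by
      unfold pvPairsFill; rw [hE, List.tail_cons]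
    have hlasteq : (o :: os).getLast! = (pvOnes xs).getLast! := by rw [hE]
    have harith : xs.length - pvCz xs = (pvOnes xs).getLast! + 1 := by rw [hcz]; omega
    have hiff : (0 < pvCz xs ∧ pvCz xs < 20)
        ↔ (0 < xs.length - 1 - (pvOnes xs).getLast! ∧
            xs.length - 1 - (pvOnes xs).getLast! < 20) := by
      rw [hcz]
    simp only [hPFeq, hlasteq, List.isEmpty_cons, Bool.not_false, and_true,
      List.tail_cons]
    split_ifs with h1 h2 h2
    · rw [harith]
    · exact absurd (hiff.1 h1) h2
    · exact absurd (hiff.2 h2) h1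
    · rfl
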